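-- pv_equiv track=rewrite | github.com/dpjojan/CS-1134 | Homework/HW4/dj2583_hw4_q6.py | appearances
-- ===== SOURCE A (Python) =====
-- def appearances(s,low,high):
--     new_dict = {}
--     if low == high:
--         new_dict[s[low]] = 1
--         return new_dict
--     else:
--         char_count = appearances(s,low+1,high)
--         if s[low] in char_count:
--             char_count[s[low]] +=1
--         else:
--             char_count[s[low]] = 1
--         return char_count
-- ===== SOURCE B (Python) =====
-- def appearances(s, low, high):
--     new_dict = {s[high]: 1}
--     for i in range(high - 1, low - 1, -1):
--         c = s[i]
--         new_dict[c] = new_dict.get(c, 0) + 1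
--     return new_dict
-- ===== Notes on version B (the rewrite author's own statement) =====
-- stated objective: simpler
-- what changed: Replaces the linear recursion (one stack frame per character, dict threaded back up) with a dict seeded from the base case s[high] and a flat descending for-loop over range(high-1, low-1, -1) using dict.get.
import Mathlib
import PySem

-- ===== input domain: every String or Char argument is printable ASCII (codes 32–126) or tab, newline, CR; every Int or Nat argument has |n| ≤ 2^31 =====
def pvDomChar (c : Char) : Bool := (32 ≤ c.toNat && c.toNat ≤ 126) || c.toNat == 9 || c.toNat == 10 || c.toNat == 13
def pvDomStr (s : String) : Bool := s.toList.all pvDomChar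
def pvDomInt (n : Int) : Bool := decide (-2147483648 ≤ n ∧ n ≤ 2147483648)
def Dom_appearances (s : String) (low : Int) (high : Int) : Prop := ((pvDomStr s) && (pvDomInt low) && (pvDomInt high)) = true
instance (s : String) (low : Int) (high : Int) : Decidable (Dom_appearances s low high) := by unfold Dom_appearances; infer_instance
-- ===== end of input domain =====

-- B replaces A's linear recursion by seeding the dict with s[high] (A's base case) and a flat descending loop over range(high-1, low-1, -1): simpler, no recursion stack.

-- ===== PORT A =====
-- s[i] as a one-character Python string; "" only outside Pre_ (where Python raises IndexError)
def pvKey (s : String) (i : Int) : String :=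
  match PySem.Str.pyGet? s i with
  | some c => String.singleton c
  | none => ""

-- the recursion of A, fueled by (high - low).toNat (exact on Pre_, where low ≤ high)
def appearancesRec (s : String) (high : Int) : Nat → Int → PySem.Dict String Int
  | 0, low => PySem.Dict.empty.insert (pvKey s low) 1
  | n + 1, low =>
      let char_count := appearancesRec s high n (low + 1)
      match char_count.get? (pvKey s low) with
      | some v => char_count.insert (pvKey s low) (v + 1)
      | none => char_count.insert (pvKey s low) 1

def appearances (s : String) (low : Int) (high : Int) : List (String × Int) :=
  (appearancesRec s high (high - low).toNat low).items

-- ===== PORT B =====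
def appearances_alt (s : String) (low : Int) (high : Int) : List (String × Int) :=
  ((PySem.List.pyRange (high - 1) (low - 1) (-1)).foldl
    (fun d i => d.insert (pvKey s i) (d.getD (pvKey s i) 0 + 1))
    (PySem.Dict.empty.insert (pvKey s high) 1)).items

-- ===== PRECONDITION & SPEC =====
-- Pre_ excludes exactly the inputs on which the Python A raises: low > high (RecursionError)
-- and an endpoint out of range (IndexError; both endpoints in range puts every i ∈ [low,high] in range).
def Pre_appearances (s : String) (low : Int) (high : Int) : Prop :=
  low ≤ high ∧ PySem.Raise.InRange s.toList.length low ∧ PySem.Raise.InRange s.toList.length high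
instance (s : String) (low : Int) (high : Int) : Decidable (Pre_appearances s low high) := by
  unfold Pre_appearances; infer_instance

def pvWitness_appearances : String × Int × Int := ("abcab", 0, 4)

def Spec_appearances (s : String) (low : Int) (high : Int) (out : List (String × Int)) : Prop :=
  out = appearances_alt s low high
instance (s : String) (low : Int) (high : Int) (out : List (String × Int)) : Decidable (Spec_appearances s low high out) := by
  unfold Spec_appearances; infer_instance

-- ===== CLAIM (what is proved, stated in full; the proofs are below) =====
def Claim_equal_appearances : Prop := ∀ (s : String) (low : Int) (high : Int), Dom_appearances s low high → Pre_appearances s low high → Spec_appearances s low high (appearances s low high)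

-- ===== LEMMAS AND PROOFS =====

-- A's branching update equals B's get-with-default update.
theorem step_eq (d : PySem.Dict String Int) (k : String) :
    (match d.get? k with
     | some v => d.insert k (v + 1)
     | none => d.insert k 1) = d.insert k (d.getD k 0 + 1) := by
  cases h : d.get? k <;> simp [PySem.Dict.getD, h]

-- splitting a countdown range at its last element
theorem pyRange_neg_one_snoc (a b : Int) (h : b ≤ a) :
    PySem.List.pyRange a (b - 1) (-1) = PySem.List.pyRange a b (-1) ++ [b] := by
  have hn : ∃ n : Nat, (a - b).toNat = n := ⟨_, rfl⟩
  obtain ⟨n, hn⟩ := hn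
  induction n generalizing a with
  | zero =>
      have hab : a = b := by omega
      subst hab
      rw [PySem.List.pyRange_neg_one_cons (by omega), PySem.List.pyRange_neg_one_eq_nil (by omega),
        PySem.List.pyRange_neg_one_eq_nil (by omega)]
      rfl
  | succ n ih =>
      have hba : b < a := by omega
      rw [PySem.List.pyRange_neg_one_cons (by omega : b - 1 < a),
        PySem.List.pyRange_neg_one_cons hba, ih (a - 1) (by omega) (by omega)]
      rfl

-- the loop of B computes the recursion of A
theorem loop_eq_rec (s : String) (high : Int) (n : Nat) :
    ∀ low : Int, low ≤ high → (high - low).toNat = n →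
    (PySem.List.pyRange (high - 1) (low - 1) (-1)).foldl
      (fun d i => d.insert (pvKey s i) (d.getD (pvKey s i) 0 + 1))
      (PySem.Dict.empty.insert (pvKey s high) 1) = appearancesRec s high n low := by
  induction n with
  | zero =>
      intro low hle hn
      have : low = high := by omega
      subst this
      rw [PySem.List.pyRange_neg_one_eq_nil (by omega)]
      simp [appearancesRec]
  | succ n ih =>
      intro low hle hn
      rw [pyRange_neg_one_snoc (high - 1) low (by omega), List.foldl_append]
      have h2 := ih (low + 1) (by omega) (by omega)
      rw [show low + 1 - 1 = low by omega] at h2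
      rw [h2]
      simp only [appearancesRec, List.foldl_cons, List.foldl_nil]
      rw [step_eq]

-- ===== VERDICT (by name: the statement is the Claim_ definition above) =====
theorem appearances_spec : Claim_equal_appearances := by
  intro s low high _hDom hPre
  unfold Spec_appearances appearances appearances_alt
  rw [loop_eq_rec s high (high - low).toNat low hPre.1 rfl]
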